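-- pv_equiv track=rewrite | github.com/CharlieYang0040/MayaScriptsRepo | pyinstaller/all_Install.py | parse_shelf_buttons
-- ===== SOURCE A (Python) =====
-- def parse_shelf_buttons(mel_content):
--     buttons = []
--     in_string = False
--     current_quote = None
--     button_start_index = mel_content.find("shelfButton")
--
--     if button_start_index == -1:
--         return buttons
--
--     i = button_start_index
--     while i < len(mel_content):
--         if mel_content[i] in ("'", '"') and (i == 0 or mel_content[i-1] != '\\'):
--             if not in_string:
--                 in_string = True
--                 current_quote = mel_content[i]
--             elif current_quote == mel_content[i]:
--                 in_string = False
--                 current_quote = None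
--         elif mel_content[i] == ';' and not in_string:
--             button_end_index = i + 1
--             button_data = mel_content[button_start_index:button_end_index]
--             buttons.append(button_data)
--             button_start_index = mel_content.find("shelfButton", button_end_index)
--             if button_start_index == -1:
--                 break
--             i = button_start_index - 1
--         i += 1
--
--     return buttons
-- ===== SOURCE B (Python) =====
-- def parse_shelf_buttons(mel_content):
--     # Instead of a per-character in_string/current_quote state machine, jump with
--     # str.find: skip each quoted string wholesale by finding its unescaped closing
--     # quote, and stop a block at the first ';' met outside any string.
--     n = len(mel_content)
--     buttons = []
--     start = mel_content.find("shelfButton")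
--     while start != -1:
--         i = start
--         end = -1
--         while i < n:
--             c = mel_content[i]
--             if c == ';':
--                 end = i + 1
--                 break
--             if c in ("'", '"') and (i == 0 or mel_content[i-1] != '\\'):
--                 # skip the quoted string: find its unescaped closing quote
--                 j = mel_content.find(c, i + 1)
--                 while j != -1 and mel_content[j-1] == '\\':
--                     j = mel_content.find(c, j + 1)
--                 if j == -1:
--                     break  # unterminated string: rest of the text is inside it
--                 i = j + 1
--             else:
--                 i += 1
--         if end == -1:
--             break
--         buttons.append(mel_content[start:end])
--         start = mel_content.find("shelfButton", end)
--     return buttons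
-- ===== Notes on version B (the rewrite author's own statement) =====
-- stated objective: alternative
-- what changed: Replaces A's per-character in_string/current_quote state machine with find()-based jumping: each quoted string is skipped wholesale by locating its unescaped closing quote with str.find, and a block ends at the first ';' met outside any string; no string-state booleans are maintained.
import Mathlib
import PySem

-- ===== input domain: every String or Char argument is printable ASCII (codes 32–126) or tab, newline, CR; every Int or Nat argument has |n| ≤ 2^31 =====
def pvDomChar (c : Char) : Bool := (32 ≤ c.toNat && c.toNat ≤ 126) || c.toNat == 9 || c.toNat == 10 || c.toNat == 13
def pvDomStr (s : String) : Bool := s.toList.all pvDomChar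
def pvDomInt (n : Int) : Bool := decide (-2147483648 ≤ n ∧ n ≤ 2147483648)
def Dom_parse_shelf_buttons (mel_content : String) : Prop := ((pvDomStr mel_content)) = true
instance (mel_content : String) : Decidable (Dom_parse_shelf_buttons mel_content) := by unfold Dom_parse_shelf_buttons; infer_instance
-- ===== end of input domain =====

-- B replaces A's per-character in_string/current_quote state machine with find()-based
-- jumping that skips each quoted string wholesale via its unescaped closing quote
-- (objective: alternative; same result).


-- ===== PORT A =====
-- A's single while-loop: i scans characters; on an unquoted ';' it appends
-- mel[start:i+1], finds the next "shelfButton" and jumps i there (i = start-1; i += 1).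
-- `fuel` is a termination bound only: i grows by ≥ 1 per step, so cs.length fuel is
-- always enough and the fuel-out branch is never reached from the entry point.
def pvA_loop (cs : List Char) (fuel i : Nat) (in_string : Bool) (quote : Option Char)
    (start : Nat) (acc : List String) : List String :=
  match fuel with
  | 0 => acc
  | fuel + 1 =>
    if i < cs.length then
      if (cs.getD i ' ' = '\'' ∨ cs.getD i ' ' = '"') ∧ (i = 0 ∨ cs.getD (i - 1) ' ' ≠ '\\') then
        if in_string = false then pvA_loop cs fuel (i + 1) true (some (cs.getD i ' ')) start acc
        else if quote = some (cs.getD i ' ') then pvA_loop cs fuel (i + 1) false none start acc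
        else pvA_loop cs fuel (i + 1) in_string quote start acc
      else if cs.getD i ' ' = ';' ∧ in_string = false then
        if PySem.Chars.findFrom cs ("shelfButton".toList) ((i + 1 : Nat) : Int) none = -1 then
          acc ++ [String.ofList (PySem.Chars.slice cs (some (start : Int)) (some ((i + 1 : Nat) : Int)))]
        else
          pvA_loop cs fuel
            ((PySem.Chars.findFrom cs ("shelfButton".toList) ((i + 1 : Nat) : Int) none).toNat - 1 + 1)
            in_string quote
            (PySem.Chars.findFrom cs ("shelfButton".toList) ((i + 1 : Nat) : Int) none).toNat
            (acc ++ [String.ofList (PySem.Chars.slice cs (some (start : Int)) (some ((i + 1 : Nat) : Int)))])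
      else pvA_loop cs fuel (i + 1) in_string quote start acc
    else acc

def parse_shelf_buttons (mel_content : String) : List String :=
  if PySem.Chars.find mel_content.toList ("shelfButton".toList) = -1 then []
  else pvA_loop mel_content.toList mel_content.toList.length
    (PySem.Chars.find mel_content.toList ("shelfButton".toList)).toNat
    false none (PySem.Chars.find mel_content.toList ("shelfButton".toList)).toNat []

-- ===== PORT B =====
-- Source B's innermost while: j = mel.find(c, i+1); while j != -1 and mel[j-1] == '\\':
-- j = mel.find(c, j+1).  `fuel` is a termination bound only (j strictly grows).
def pvB_skip (cs : List Char) (fuel : Nat) (q : Char) (j : Int) : Int :=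
  match fuel with
  | 0 => j
  | fuel + 1 =>
    if j ≠ -1 ∧ cs.getD (j.toNat - 1) ' ' = '\\' then
      pvB_skip cs fuel q (PySem.Chars.findFrom cs [q] (j + 1) none)
    else j

-- Source B's per-block while: walk i; ';' ends the block (some (i+1)); an unescaped
-- opening quote jumps i past the string via pvB_skip; unterminated string or end of
-- text gives none.  `fuel` is a termination bound only (i grows by ≥ 1 per step).
def pvB_block (cs : List Char) (fuel i : Nat) : Option Nat :=
  match fuel with
  | 0 => none
  | fuel + 1 =>
    if i < cs.length then
      if cs.getD i ' ' = ';' then some (i + 1)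
      else if (cs.getD i ' ' = '\'' ∨ cs.getD i ' ' = '"') ∧ (i = 0 ∨ cs.getD (i - 1) ' ' ≠ '\\') then
        if pvB_skip cs cs.length (cs.getD i ' ')
             (PySem.Chars.findFrom cs [cs.getD i ' '] ((i + 1 : Nat) : Int) none) = -1 then none
        else pvB_block cs fuel
          ((pvB_skip cs cs.length (cs.getD i ' ')
             (PySem.Chars.findFrom cs [cs.getD i ' '] ((i + 1 : Nat) : Int) none)).toNat + 1)
      else pvB_block cs fuel (i + 1)
    else none

-- Source B's outer while: while start != -1, delimit one block, append it, find the next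
-- "shelfButton".  `fuel` is a termination bound only (start strictly grows).
def pvB_outer (cs : List Char) (fuel : Nat) (start : Nat) (acc : List String) : List String :=
  match fuel with
  | 0 => acc
  | fuel + 1 =>
    match pvB_block cs (cs.length + 1) start with
    | none => acc
    | some e =>
      if PySem.Chars.findFrom cs ("shelfButton".toList) ((e : Nat) : Int) none = -1 then
        acc ++ [String.ofList (PySem.Chars.slice cs (some (start : Int)) (some ((e : Nat) : Int)))]
      else
        pvB_outer cs fuel (PySem.Chars.findFrom cs ("shelfButton".toList) ((e : Nat) : Int) none).toNat
          (acc ++ [String.ofList (PySem.Chars.slice cs (some (start : Int)) (some ((e : Nat) : Int)))])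

def parse_shelf_buttons_alt (mel_content : String) : List String :=
  if PySem.Chars.find mel_content.toList ("shelfButton".toList) = -1 then []
  else pvB_outer mel_content.toList (mel_content.toList.length + 1)
    (PySem.Chars.find mel_content.toList ("shelfButton".toList)).toNat []

-- ===== PRECONDITION & SPEC =====
def Spec_parse_shelf_buttons (mel_content : String) (out : List String) : Prop := out = parse_shelf_buttons_alt mel_content
instance (mel_content : String) (out : List String) : Decidable (Spec_parse_shelf_buttons mel_content out) := by unfold Spec_parse_shelf_buttons; infer_instance

-- ===== CLAIM (what is proved, stated in full; the proofs are below) =====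
def Claim_equal_parse_shelf_buttons : Prop := ∀ (mel_content : String), Dom_parse_shelf_buttons mel_content → Spec_parse_shelf_buttons mel_content (parse_shelf_buttons mel_content)

-- ===== LEMMAS AND PROOFS =====

-- proof-side model of A's scan to the first unquoted ';' (not used by either port):
-- from position i in state (in_string, quote), the index just past the first
-- semicolon outside a string, or none if the text ends first
def pvScan (cs : List Char) (fuel i : Nat) (in_string : Bool) (quote : Option Char) : Option Nat :=
  match fuel with
  | 0 => none
  | fuel + 1 =>
    if i < cs.length then
      if (cs.getD i ' ' = '\'' ∨ cs.getD i ' ' = '"') ∧ (i = 0 ∨ cs.getD (i - 1) ' ' ≠ '\\') then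
        if in_string = false then pvScan cs fuel (i + 1) true (some (cs.getD i ' '))
        else if quote = some (cs.getD i ' ') then pvScan cs fuel (i + 1) false none
        else pvScan cs fuel (i + 1) in_string quote
      else if cs.getD i ' ' = ';' ∧ in_string = false then some (i + 1)
      else pvScan cs fuel (i + 1) in_string quote
    else none

-- the scan result does not depend on the fuel once the fuel covers the text
theorem pvScan_fuel (cs : List Char) : ∀ (f g i : Nat), cs.length - i ≤ f → cs.length - i ≤ g →
    ∀ (s : Bool) (q : Option Char), pvScan cs f i s q = pvScan cs g i s q := by
  intro f
  induction f with
  | zero =>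
    intro g i hf hg s q
    have hi : ¬ i < cs.length := by omega
    cases g <;> simp [pvScan, hi]
  | succ f ih =>
    intro g i hf hg s q
    cases g with
    | zero =>
      have hi : ¬ i < cs.length := by omega
      simp [pvScan, hi]
    | succ g =>
      rw [pvScan, pvScan]
      by_cases hi : i < cs.length
      · rw [if_pos hi, if_pos hi]
        by_cases h1 : (cs.getD i ' ' = '\'' ∨ cs.getD i ' ' = '"') ∧ (i = 0 ∨ cs.getD (i - 1) ' ' ≠ '\\')
        · rw [if_pos h1, if_pos h1]
          by_cases h2 : s = false
          · rw [if_pos h2, if_pos h2]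
            exact ih g (i + 1) (by omega) (by omega) _ _
          · rw [if_neg h2, if_neg h2]
            by_cases h3 : q = some (cs.getD i ' ')
            · rw [if_pos h3, if_pos h3]
              exact ih g (i + 1) (by omega) (by omega) _ _
            · rw [if_neg h3, if_neg h3]
              exact ih g (i + 1) (by omega) (by omega) _ _
        · rw [if_neg h1, if_neg h1]
          by_cases h4 : cs.getD i ' ' = ';' ∧ s = false
          · rw [if_pos h4, if_pos h4]
          · rw [if_neg h4, if_neg h4]
            exact ih g (i + 1) (by omega) (by omega) _ _
      · rw [if_neg hi, if_neg hi]

-- bound on the scan result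
theorem pvScan_bound (cs : List Char) : ∀ (f i : Nat) (in_string : Bool) (quote : Option Char) (e : Nat),
    pvScan cs f i in_string quote = some e → i < e ∧ e ≤ cs.length := by
  intro f
  induction f with
  | zero =>
    intro i s q e h
    simp [pvScan] at h
  | succ f ih =>
    intro i s q e h
    rw [pvScan] at h
    by_cases hi : i < cs.length
    · rw [if_pos hi] at h
      split_ifs at h with h1 h2 h3 h4
      · have := ih _ _ _ _ h; omega
      · have := ih _ _ _ _ h; omega
      · have := ih _ _ _ _ h; omega
      · simp at h; omega
      · have := ih _ _ _ _ h; omega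
    · rw [if_neg hi] at h
      simp at h

-- fuel-free wrapper: full-fuel scan
def Scan (cs : List Char) (i : Nat) (s : Bool) (q : Option Char) : Option Nat :=
  pvScan cs cs.length i s q

theorem Scan_eq (cs : List Char) (f i : Nat) (hf : cs.length - i ≤ f) (s : Bool) (q : Option Char) :
    pvScan cs f i s q = Scan cs i s q :=
  pvScan_fuel cs f cs.length i hf (by omega) s q

theorem Scan_step (cs : List Char) (i : Nat) (s : Bool) (q : Option Char) (hi : i < cs.length) :
    Scan cs i s q =
      if (cs.getD i ' ' = '\'' ∨ cs.getD i ' ' = '"') ∧ (i = 0 ∨ cs.getD (i - 1) ' ' ≠ '\\') then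
        if s = false then Scan cs (i + 1) true (some (cs.getD i ' '))
        else if q = some (cs.getD i ' ') then Scan cs (i + 1) false none
        else Scan cs (i + 1) s q
      else if cs.getD i ' ' = ';' ∧ s = false then some (i + 1)
      else Scan cs (i + 1) s q := by
  have h1 : cs.length = (cs.length - 1) + 1 := by omega
  rw [Scan, h1, pvScan, if_pos hi]
  rw [Scan_eq cs (cs.length - 1) (i+1) (by omega), Scan_eq cs (cs.length - 1) (i+1) (by omega),
      Scan_eq cs (cs.length - 1) (i+1) (by omega)]

theorem Scan_end (cs : List Char) (i : Nat) (s : Bool) (q : Option Char) (hi : ¬ i < cs.length) :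
    Scan cs i s q = none := by
  rw [Scan]
  generalize cs.length = L
  cases L with
  | zero => rw [pvScan]
  | succ m => rw [pvScan, if_neg hi]

-- [q] is a prefix of cs.drop m iff cs has q at position m
theorem single_prefix_iff (cs : List Char) (q : Char) (m : Nat) :
    [q] <+: cs.drop m ↔ m < cs.length ∧ cs.getD m ' ' = q := by
  constructor
  · intro ⟨t, ht⟩
    have hm : m < cs.length := by
      by_contra h
      rw [List.drop_eq_nil_of_le (by omega)] at ht
      simp at ht
    refine ⟨hm, ?_⟩
    have h0 : (cs.drop m).getD 0 ' ' = q := by rw [← ht]; rfl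
    simpa [List.getD, List.getElem?_drop] using h0
  · intro ⟨hm, hq⟩
    refine ⟨cs.drop (m + 1), ?_⟩
    have h0 : (cs.drop m).getD 0 ' ' = q := by simpa [List.getD, List.getElem?_drop] using hq
    cases hd : cs.drop m with
    | nil =>
      exfalso
      have := List.length_drop (l := cs) (i := m)
      rw [hd] at this; simp at this; omega
    | cons a t =>
      rw [hd] at h0; simp at h0
      have ht : t = cs.drop (m + 1) := by
        have h2 : (cs.drop m).drop 1 = cs.drop (m + 1) := by rw [List.drop_drop]
        rw [hd] at h2; simpa using h2
      simp [h0, ht]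

-- [q] occurs in cs.drop k iff cs has q at some position ≥ k
theorem infix_single_iff (cs : List Char) (q : Char) (k : Nat) :
    [q] <:+: cs.drop k ↔ ∃ m, k ≤ m ∧ m < cs.length ∧ cs.getD m ' ' = q := by
  constructor
  · intro h
    have h2 := (PySem.Chars.exists_prefix_drop_iff_isIn [q] (cs.drop k)).mpr
      ((PySem.Chars.isIn_iff_infix [q] (cs.drop k)).mpr h)
    obtain ⟨j, hj⟩ := h2
    rw [List.drop_drop] at hj
    obtain ⟨hlt, hq⟩ := (single_prefix_iff cs q (k + j)).mp hj
    exact ⟨k + j, by omega, hlt, hq⟩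
  · intro ⟨m, hkm, hlt, hq⟩
    have hj : [q] <+: (cs.drop k).drop (m - k) := by
      rw [List.drop_drop]
      have : k + (m - k) = m := by omega
      rw [this]
      exact (single_prefix_iff cs q m).mpr ⟨hlt, hq⟩
    exact (PySem.Chars.isIn_iff_infix [q] (cs.drop k)).mp
      ((PySem.Chars.exists_prefix_drop_iff_isIn [q] (cs.drop k)).mp ⟨m - k, hj⟩)

-- findFrom for a single char returns -1 iff q does not occur at any position ≥ k
theorem ff_neg (cs : List Char) (q : Char) (k : Nat) (hk : k ≤ cs.length) :
    PySem.Chars.findFrom cs [q] (k : Int) none = -1 ↔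
      ∀ m, k ≤ m → m < cs.length → cs.getD m ' ' ≠ q := by
  rw [PySem.Chars.findFrom_natCast_eq_neg_one_iff cs [q] k hk, infix_single_iff]
  push_neg
  constructor
  · intro h m h1 h2; exact h m h1 h2
  · intro h m h1 h2; exact h m h1 h2

-- findFrom for a single char, when it succeeds, returns the least occurrence ≥ k
theorem ff_pos (cs : List Char) (q : Char) (k : Nat) (hk : k ≤ cs.length)
    (h : PySem.Chars.findFrom cs [q] (k : Int) none ≠ -1) :
    0 ≤ PySem.Chars.findFrom cs [q] (k : Int) none ∧
    k ≤ (PySem.Chars.findFrom cs [q] (k : Int) none).toNat ∧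
    (PySem.Chars.findFrom cs [q] (k : Int) none).toNat < cs.length ∧
    cs.getD (PySem.Chars.findFrom cs [q] (k : Int) none).toNat ' ' = q ∧
    ∀ m, k ≤ m → m < (PySem.Chars.findFrom cs [q] (k : Int) none).toNat →
      cs.getD m ' ' ≠ q := by
  obtain ⟨hle, hpre, hmin⟩ := PySem.Chars.findFrom_natCast_spec cs [q] k hk h
  obtain ⟨hlt, hq⟩ := (single_prefix_iff cs q _).mp hpre
  refine ⟨by omega, by omega, hlt, hq, ?_⟩
  intro m h1 h2 hqm
  exact hmin m h1 h2 ((single_prefix_iff cs q m).mpr ⟨by omega, hqm⟩)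

-- at an occurrence, findFrom returns the start itself
theorem findFrom_single_here (cs : List Char) (q : Char) (i : Nat) (hi : i < cs.length)
    (hq : cs.getD i ' ' = q) : PySem.Chars.findFrom cs [q] (i : Int) none = (i : Int) := by
  have hne : PySem.Chars.findFrom cs [q] (i : Int) none ≠ -1 := by
    rw [Ne, ff_neg cs q i (by omega)]
    push_neg
    exact ⟨i, le_refl i, hi, hq⟩
  obtain ⟨h0, h1, h2, h3, h4⟩ := ff_pos cs q i (by omega) hne
  by_contra hne2
  have hgt : i < (PySem.Chars.findFrom cs [q] (i : Int) none).toNat := by omega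
  exact h4 i (le_refl i) hgt hq

-- at a non-occurrence, findFrom from i equals findFrom from i+1
theorem findFrom_single_skip (cs : List Char) (q : Char) (i : Nat) (hi : i < cs.length)
    (hq : cs.getD i ' ' ≠ q) :
    PySem.Chars.findFrom cs [q] (i : Int) none =
      PySem.Chars.findFrom cs [q] ((i + 1 : Nat) : Int) none := by
  by_cases h : PySem.Chars.findFrom cs [q] ((i + 1 : Nat) : Int) none = -1
  · rw [h, ff_neg cs q i (by omega)]
    rw [ff_neg cs q (i + 1) (by omega)] at h
    intro m h1 h2
    rcases Nat.eq_or_lt_of_le h1 with he | hlt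
    · rw [← he]; exact hq
    · exact h m hlt h2
  · obtain ⟨h0', h1', h2', h3', h4'⟩ := ff_pos cs q (i + 1) (by omega) h
    have hne : PySem.Chars.findFrom cs [q] (i : Int) none ≠ -1 := by
      rw [Ne, ff_neg cs q i (by omega)]
      push_neg
      exact ⟨_, by omega, h2', h3'⟩
    obtain ⟨h0, h1, h2, h3, h4⟩ := ff_pos cs q i (by omega) hne
    have hter : (PySem.Chars.findFrom cs [q] (i : Int) none).toNat ≠ i := by
      intro he; rw [he] at h3; exact hq h3
    have heq : (PySem.Chars.findFrom cs [q] (i : Int) none).toNat =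
        (PySem.Chars.findFrom cs [q] ((i + 1 : Nat) : Int) none).toNat := by
      by_contra hne3
      rcases Nat.lt_or_ge (PySem.Chars.findFrom cs [q] (i : Int) none).toNat
          (PySem.Chars.findFrom cs [q] ((i + 1 : Nat) : Int) none).toNat with hlt | hge
      · exact h4' _ (by omega) hlt h3
      · exact h4 _ (by omega) (by omega) h3'
    omega

-- A's in-string scan: it reaches the next occurrence of the quote char, and either
-- closes there (unescaped) or stays in the string (escaped)
theorem Scan_string (cs : List Char) (q : Char) (hq : q = '\'' ∨ q = '"') :
    ∀ (d i : Nat), cs.length - i ≤ d → 1 ≤ i → i ≤ cs.length →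
    Scan cs i true (some q) =
      (if PySem.Chars.findFrom cs [q] (i : Int) none = -1 then none
       else if cs.getD ((PySem.Chars.findFrom cs [q] (i : Int) none).toNat - 1) ' ' = '\\'
         then Scan cs ((PySem.Chars.findFrom cs [q] (i : Int) none).toNat + 1) true (some q)
         else Scan cs ((PySem.Chars.findFrom cs [q] (i : Int) none).toNat + 1) false none) := by
  intro d
  induction d with
  | zero =>
    intro i hd h1 h2
    have hi : ¬ i < cs.length := by omega
    rw [Scan_end cs i true (some q) hi]
    rw [if_pos ((ff_neg cs q i h2).mpr (by intro m hm1 hm2; omega))]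
  | succ d ih =>
    intro i hd h1 h2
    by_cases hi : i < cs.length
    · by_cases hc : cs.getD i ' ' = q
      · rw [findFrom_single_here cs q i hi hc]
        rw [if_neg (by omega)]
        simp only [Int.toNat_natCast]
        rw [Scan_step cs i true (some q) hi]
        by_cases he : cs.getD (i - 1) ' ' = '\\'
        · rw [if_pos he]
          rw [if_neg (by
            intro ⟨hA, hB⟩
            rcases hB with hB | hB
            · omega
            · exact hB he)]
          rw [if_neg (by
            intro ⟨hA, _⟩
            rw [hc] at hA
            rcases hq with h | h <;> simp [h] at hA)]
        · rw [if_neg he]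
          rw [if_pos ⟨by rw [hc]; exact hq, Or.inr he⟩]
          rw [if_neg (by simp), if_pos (by rw [hc])]
      · rw [findFrom_single_skip cs q i hi hc]
        rw [Scan_step cs i true (some q) hi]
        have hstep : (if (cs.getD i ' ' = '\'' ∨ cs.getD i ' ' = '"') ∧ (i = 0 ∨ cs.getD (i - 1) ' ' ≠ '\\') then
              if (true : Bool) = false then Scan cs (i + 1) true (some (cs.getD i ' '))
              else if some q = some (cs.getD i ' ') then Scan cs (i + 1) false none
              else Scan cs (i + 1) true (some q)
            else if cs.getD i ' ' = ';' ∧ (true : Bool) = false then some (i + 1)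
            else Scan cs (i + 1) true (some q)) = Scan cs (i + 1) true (some q) := by
          split_ifs with hA hB hC hD
          · simp at hB
          · simp at hC; exact absurd hC.symm hc
          · rfl
          · simp at hD
          · rfl
        rw [hstep]
        exact ih (i + 1) (by omega) (by omega) (by omega)
    · have h2' : i = cs.length := by omega
      rw [Scan_end cs i true (some q) hi]
      rw [if_pos ((ff_neg cs q i h2).mpr (by intro m hm1 hm2; omega))]

-- j is a legal pvB_skip argument: -1 or an occurrence of q
def SkipOk (cs : List Char) (q : Char) (j : Int) : Prop :=
  j = -1 ∨ (0 ≤ j ∧ j.toNat < cs.length ∧ cs.getD j.toNat ' ' = q)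

theorem ff_ok (cs : List Char) (q : Char) (k : Nat) (hk : k ≤ cs.length) :
    SkipOk cs q (PySem.Chars.findFrom cs [q] (k : Int) none) := by
  by_cases h : PySem.Chars.findFrom cs [q] (k : Int) none = -1
  · exact Or.inl h
  · obtain ⟨h0, _, h2, h3, _⟩ := ff_pos cs q k hk h
    exact Or.inr ⟨h0, h2, h3⟩

-- pvB_skip leaves -1 unchanged
theorem pvB_skip_neg (cs : List Char) (q : Char) : ∀ (f : Nat), pvB_skip cs f q (-1) = -1 := by
  intro f
  cases f with
  | zero => rw [pvB_skip]
  | succ f =>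
    rw [pvB_skip]
    rw [if_neg (by
      intro h
      exact h.1 rfl)]

-- pvB_skip does not depend on the fuel once the fuel is large enough
theorem pvB_skip_fuel (cs : List Char) (q : Char) :
    ∀ (f : Nat), ∀ (g : Nat) (j : Int), SkipOk cs q j →
      (j = -1 → 1 ≤ f ∧ 1 ≤ g) →
      (0 ≤ j → cs.length - j.toNat < f ∧ cs.length - j.toNat < g) →
      pvB_skip cs f q j = pvB_skip cs g q j := by
  intro f
  induction f with
  | zero =>
    intro g j hok hneg hpos
    rcases hok with h | ⟨h0, h1, _⟩
    · have := hneg h; omega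
    · have := hpos h0; omega
  | succ f ih =>
    intro g j hok hneg hpos
    cases g with
    | zero =>
      rcases hok with h | ⟨h0, h1, _⟩
      · have := hneg h; omega
      · have := hpos h0; omega
    | succ g =>
      rw [pvB_skip, pvB_skip]
      by_cases hc : j ≠ -1 ∧ cs.getD (j.toNat - 1) ' ' = '\\'
      · rw [if_pos hc, if_pos hc]
        rcases hok with h | ⟨h0, h1, h2⟩
        · exact absurd h hc.1
        · have hcast : j + 1 = ((j.toNat + 1 : Nat) : Int) := by omega
          rw [hcast]
          have hok' := ff_ok cs q (j.toNat + 1) (by omega)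
          refine ih g _ hok' ?_ ?_
          · intro _
            have := hpos h0
            omega
          · intro h0'
            obtain ⟨_, hb, hc', _, _⟩ := ff_pos cs q (j.toNat + 1) (by omega) (by
              intro he
              rw [he] at h0'
              omega)
            have := hpos h0
            omega
      · rw [if_neg hc, if_neg hc]

-- pvB_skip's result is -1 or a later occurrence of q
theorem pvB_skip_grow (cs : List Char) (q : Char) :
    ∀ (f : Nat) (j : Int), SkipOk cs q j →
      pvB_skip cs f q j = -1 ∨
        (0 ≤ pvB_skip cs f q j ∧ (pvB_skip cs f q j).toNat < cs.length ∧
         cs.getD (pvB_skip cs f q j).toNat ' ' = q ∧ j ≤ pvB_skip cs f q j) := by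
  intro f
  induction f with
  | zero =>
    intro j hok
    rcases hok with h | ⟨h0, h1, h2⟩
    · exact Or.inl (by rw [pvB_skip]; exact h)
    · exact Or.inr (by rw [pvB_skip]; exact ⟨h0, h1, h2, le_refl j⟩)
  | succ f ih =>
    intro j hok
    rw [pvB_skip]
    by_cases hc : j ≠ -1 ∧ cs.getD (j.toNat - 1) ' ' = '\\'
    · rw [if_pos hc]
      rcases hok with h | ⟨h0, h1, h2⟩
      · exact absurd h hc.1
      · have hcast : j + 1 = ((j.toNat + 1 : Nat) : Int) := by omega
        rw [hcast]
        have hok' := ff_ok cs q (j.toNat + 1) (by omega)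
        rcases ih _ hok' with h | ⟨ha, hb, hcq, hd⟩
        · exact Or.inl h
        · refine Or.inr ⟨ha, hb, hcq, ?_⟩
          rcases hok' with he | ⟨he0, he1, _⟩
          · rw [he, pvB_skip_neg cs q f] at ha
            omega
          · have := ff_pos cs q (j.toNat + 1) (by omega) (by
              intro hx
              rw [hx] at he0
              omega)
            omega
    · rw [if_neg hc]
      rcases hok with h | ⟨h0, h1, h2⟩
      · exact Or.inl h
      · exact Or.inr ⟨h0, h1, h2, le_refl j⟩

-- A's in-string scan equals: run B's quote-skipping loop, then continue outside the string
theorem Scan_skip (cs : List Char) (q : Char) (hq : q = '\'' ∨ q = '"') :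
    ∀ (d i : Nat), cs.length - i ≤ d → 1 ≤ i → i ≤ cs.length →
    Scan cs i true (some q) =
      (if pvB_skip cs (cs.length + 1) q (PySem.Chars.findFrom cs [q] (i : Int) none) = -1 then none
       else Scan cs
         ((pvB_skip cs (cs.length + 1) q (PySem.Chars.findFrom cs [q] (i : Int) none)).toNat + 1)
         false none) := by
  intro d
  induction d with
  | zero =>
    intro i hd h1 h2
    have hi : ¬ i < cs.length := by omega
    have hff : PySem.Chars.findFrom cs [q] (i : Int) none = -1 :=
      (ff_neg cs q i h2).mpr (by intro m hm1 hm2; omega)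
    rw [Scan_end cs i true (some q) hi, hff, pvB_skip_neg cs q (cs.length + 1)]
    rw [if_pos rfl]
  | succ d ih =>
    intro i hd h1 h2
    rw [Scan_string cs q hq (d + 1) i hd h1 h2]
    by_cases hff : PySem.Chars.findFrom cs [q] (i : Int) none = -1
    · rw [if_pos hff, hff, pvB_skip_neg cs q (cs.length + 1)]
      rw [if_pos rfl]
    · rw [if_neg hff]
      obtain ⟨h0, hk, hlt, hocc, _⟩ := ff_pos cs q i h2 hff
      by_cases he : cs.getD ((PySem.Chars.findFrom cs [q] (i : Int) none).toNat - 1) ' ' = '\\'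
      · rw [if_pos he]
        rw [ih ((PySem.Chars.findFrom cs [q] (i : Int) none).toNat + 1) (by omega) (by omega) (by omega)]
        have hstep : pvB_skip cs (cs.length + 1) q (PySem.Chars.findFrom cs [q] (i : Int) none) =
            pvB_skip cs (cs.length + 1) q
              (PySem.Chars.findFrom cs [q]
                (((PySem.Chars.findFrom cs [q] (i : Int) none).toNat + 1 : Nat) : Int) none) := by
          rw [pvB_skip, if_pos ⟨hff, he⟩]
          have hcast : PySem.Chars.findFrom cs [q] (i : Int) none + 1 =
              (((PySem.Chars.findFrom cs [q] (i : Int) none).toNat + 1 : Nat) : Int) := by omega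
          rw [hcast]
          refine pvB_skip_fuel cs q (cs.length) (cs.length + 1) _
            (ff_ok cs q _ (by omega)) ?_ ?_
          · intro _; omega
          · intro h0'
            obtain ⟨_, hb, hc', _, _⟩ := ff_pos cs q ((PySem.Chars.findFrom cs [q] (i : Int) none).toNat + 1)
              (by omega) (by intro hx; rw [hx] at h0'; omega)
            omega
        rw [hstep]
      · rw [if_neg he]
        have hskip : pvB_skip cs (cs.length + 1) q (PySem.Chars.findFrom cs [q] (i : Int) none) =
            PySem.Chars.findFrom cs [q] (i : Int) none := by
          rw [pvB_skip, if_neg (by intro ⟨_, hB⟩; exact he hB)]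
        rw [hskip, if_neg hff]

-- B's per-block loop equals A's scan to the first unquoted ';'
theorem pvB_block_eq (cs : List Char) :
    ∀ (f i : Nat), cs.length - i < f → i ≤ cs.length →
      pvB_block cs f i = Scan cs i false none := by
  intro f
  induction f with
  | zero => intro i h; omega
  | succ f ih =>
    intro i hf hle
    rw [pvB_block]
    by_cases hi : i < cs.length
    · rw [if_pos hi]
      by_cases hsemi : cs.getD i ' ' = ';'
      · rw [if_pos hsemi, Scan_step cs i false none hi]
        rw [if_neg (by
          intro ⟨hA, _⟩
          rw [hsemi] at hA
          rcases hA with h | h <;> simp at h)]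
        rw [if_pos ⟨hsemi, rfl⟩]
      · rw [if_neg hsemi]
        by_cases hquote : (cs.getD i ' ' = '\'' ∨ cs.getD i ' ' = '"') ∧ (i = 0 ∨ cs.getD (i - 1) ' ' ≠ '\\')
        · rw [if_pos hquote]
          have hfuel : pvB_skip cs cs.length (cs.getD i ' ')
                (PySem.Chars.findFrom cs [cs.getD i ' '] ((i + 1 : Nat) : Int) none) =
              pvB_skip cs (cs.length + 1) (cs.getD i ' ')
                (PySem.Chars.findFrom cs [cs.getD i ' '] ((i + 1 : Nat) : Int) none) := by
            refine pvB_skip_fuel cs (cs.getD i ' ') cs.length (cs.length + 1) _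
              (ff_ok cs (cs.getD i ' ') (i + 1) (by omega)) ?_ ?_
            · intro _; omega
            · intro h0'
              obtain ⟨_, hb, hc', _, _⟩ := ff_pos cs (cs.getD i ' ') (i + 1) (by omega)
                (by intro hx; rw [hx] at h0'; omega)
              omega
          rw [hfuel]
          rw [Scan_step cs i false none hi, if_pos hquote, if_pos rfl]
          rw [Scan_skip cs (cs.getD i ' ') hquote.1 (cs.length - (i + 1)) (i + 1)
            (by omega) (by omega) (by omega)]
          by_cases hskip : pvB_skip cs (cs.length + 1) (cs.getD i ' ')
              (PySem.Chars.findFrom cs [cs.getD i ' '] ((i + 1 : Nat) : Int) none) = -1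
          · rw [if_pos hskip, if_pos hskip]
          · rw [if_neg hskip, if_neg hskip]
            rcases pvB_skip_grow cs (cs.getD i ' ') (cs.length + 1) _
                (ff_ok cs (cs.getD i ' ') (i + 1) (by omega)) with h | ⟨ha, hb, _, hd⟩
            · exact absurd h hskip
            · have hffne : PySem.Chars.findFrom cs [cs.getD i ' '] ((i + 1 : Nat) : Int) none ≠ -1 := by
                intro hx
                apply hskip
                rw [hx]
                exact pvB_skip_neg cs (cs.getD i ' ') (cs.length + 1)
              obtain ⟨hf0, hf1, hf2, _, _⟩ := ff_pos cs (cs.getD i ' ') (i + 1) (by omega) hffne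
              exact ih _ (by omega) (by omega)
        · rw [if_neg hquote]
          rw [Scan_step cs i false none hi, if_neg hquote]
          rw [if_neg (by intro ⟨hA, _⟩; exact hsemi hA)]
          exact ih (i + 1) (by omega) (by omega)
    · rw [if_neg hi]
      rw [Scan_end cs i false none hi]

-- A's loop from a state satisfying (in_string = false → quote = none) behaves as:
-- run the scan; on none return acc, on some e append the slice and, if a next
-- occurrence exists, restart from it in the clean state (false, none).
theorem loopA_eq (cs : List Char) : ∀ (f i : Nat), cs.length - i ≤ f →
    ∀ (s : Bool) (q : Option Char) (start : Nat) (acc : List String), (s = false → q = none) →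
    pvA_loop cs f i s q start acc =
      match pvScan cs f i s q with
      | none => acc
      | some e =>
        if PySem.Chars.findFrom cs ("shelfButton".toList) ((e : Nat) : Int) none = -1 then
          acc ++ [String.ofList (PySem.Chars.slice cs (some (start : Int)) (some ((e : Nat) : Int)))]
        else
          pvA_loop cs (f - (e - i))
            (PySem.Chars.findFrom cs ("shelfButton".toList) ((e : Nat) : Int) none).toNat
            false none
            (PySem.Chars.findFrom cs ("shelfButton".toList) ((e : Nat) : Int) none).toNat
            (acc ++ [String.ofList (PySem.Chars.slice cs (some (start : Int)) (some ((e : Nat) : Int)))]) := by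
  intro f
  induction f with
  | zero =>
    intro i hf s q start acc hq
    simp [pvA_loop, pvScan]
  | succ f ih =>
    intro i hf s q start acc hq
    rw [pvA_loop, pvScan]
    by_cases hi : i < cs.length
    · rw [if_pos hi, if_pos hi]
      by_cases h1 : (cs.getD i ' ' = '\'' ∨ cs.getD i ' ' = '"') ∧ (i = 0 ∨ cs.getD (i - 1) ' ' ≠ '\\')
      · rw [if_pos h1, if_pos h1]
        by_cases h2 : s = false
        · rw [if_pos h2, if_pos h2]
          rw [ih (i + 1) (by omega) true (some (cs.getD i ' ')) start acc (by simp)]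
          cases hscan : pvScan cs f (i + 1) true (some (cs.getD i ' ')) with
          | none => rfl
          | some e =>
            have hb := pvScan_bound cs f (i + 1) _ _ e hscan
            have : f + 1 - (e - i) = f - (e - (i + 1)) := by omega
            simp only [this]
        · rw [if_neg h2, if_neg h2]
          by_cases h3 : q = some (cs.getD i ' ')
          · rw [if_pos h3, if_pos h3]
            rw [ih (i + 1) (by omega) false none start acc (by simp)]
            cases hscan : pvScan cs f (i + 1) false none with
            | none => rfl
            | some e =>
              have hb := pvScan_bound cs f (i + 1) _ _ e hscan
              have : f + 1 - (e - i) = f - (e - (i + 1)) := by omega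
              simp only [this]
          · rw [if_neg h3, if_neg h3]
            rw [ih (i + 1) (by omega) s q start acc hq]
            cases hscan : pvScan cs f (i + 1) s q with
            | none => rfl
            | some e =>
              have hb := pvScan_bound cs f (i + 1) _ _ e hscan
              have : f + 1 - (e - i) = f - (e - (i + 1)) := by omega
              simp only [this]
      · rw [if_neg h1, if_neg h1]
        by_cases h4 : cs.getD i ' ' = ';' ∧ s = false
        · rw [if_pos h4, if_pos h4]
          by_cases h5 : PySem.Chars.findFrom cs ("shelfButton".toList) ((i + 1 : Nat) : Int) none = -1
          · rw [if_pos h5]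
            have h5' := h5
            push_cast at h5'
            simp [h5']
          · rw [if_neg h5]
            obtain ⟨hc4, hs4⟩ := h4
            subst hs4
            rw [hq rfl]
            have hspec := PySem.Chars.findFrom_natCast_spec cs ("shelfButton".toList) (i + 1) (by omega) h5
            have h6 : (PySem.Chars.findFrom cs ("shelfButton".toList) ((i + 1 : Nat) : Int) none).toNat - 1 + 1
                = (PySem.Chars.findFrom cs ("shelfButton".toList) ((i + 1 : Nat) : Int) none).toNat := by
              have := hspec.1; omega
            rw [h6]
            have h5' := h5
            push_cast at h5'
            simp [h5']
        · rw [if_neg h4, if_neg h4]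
          rw [ih (i + 1) (by omega) s q start acc hq]
          cases hscan : pvScan cs f (i + 1) s q with
          | none => rfl
          | some e =>
            have hb := pvScan_bound cs f (i + 1) _ _ e hscan
            have : f + 1 - (e - i) = f - (e - (i + 1)) := by omega
            simp only [this]
    · rw [if_neg hi, if_neg hi]

-- A's loop started in the clean state equals B's outer loop
theorem loop_eq_outer (cs : List Char) : ∀ (fO fA start : Nat), cs.length - start < fO →
    cs.length - start ≤ fA → start ≤ cs.length → ∀ (acc : List String),
    pvA_loop cs fA start false none start acc = pvB_outer cs fO start acc := by
  intro fO
  induction fO with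
  | zero => intro fA start h; omega
  | succ fO ih =>
    intro fA start hO hA hs acc
    rw [pvB_outer, loopA_eq cs fA start hA false none start acc (by simp)]
    have hps : pvScan cs fA start false none = pvB_block cs (cs.length + 1) start := by
      rw [Scan_eq cs fA start hA, ← pvB_block_eq cs (cs.length + 1) start (by omega) hs]
    rw [hps]
    cases hscan : pvB_block cs (cs.length + 1) start with
    | none => rfl
    | some e =>
      have he : start < e ∧ e ≤ cs.length := by
        rw [pvB_block_eq cs (cs.length + 1) start (by omega) hs] at hscan
        exact pvScan_bound cs cs.length start false none e hscan
      simp only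
      split_ifs with h5
      · rfl
      · have hspec := PySem.Chars.findFrom_natCast_spec cs ("shelfButton".toList) e (by omega) h5
        have h6 := hspec.1
        have hlen := hspec.2.1.length_le
        rw [List.length_drop] at hlen
        have h11 : ("shelfButton".toList).length = 11 := rfl
        rw [h11] at hlen
        exact ih (fA - (e - start)) _ (by omega) (by omega) (by omega) _

-- ===== VERDICT (by name: the statement is the Claim_ definition above) =====
theorem parse_shelf_buttons_spec : Claim_equal_parse_shelf_buttons := by
  intro mel _
  unfold Spec_parse_shelf_buttons parse_shelf_buttons parse_shelf_buttons_alt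
  split_ifs with h
  · rfl
  · refine loop_eq_outer mel.toList (mel.toList.length + 1) mel.toList.length _ (by omega) (by omega) ?_ []
    have h1 := PySem.Chars.find_le_length mel.toList ("shelfButton".toList)
    omega
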